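-- pv_equiv track=rewrite | github.com/hwjustin/chestx | categorisation/chestx_split.py | select_subset_ids
-- ===== SOURCE A (Python) =====
-- def select_subset_ids(text_preds, image_preds, ground_truths):
--     R_ids, U_text_ids, U_image_ids, AS_ids = [], [], [], []
--     for image_id, gth in ground_truths.items():
--         text_pred = text_preds.get(image_id, {})
--         image_pred = image_preds.get(image_id, {})
--
--         if not text_pred or not image_pred:
--             continue
--
--         text_correct = any(text_pred.get(key.replace('_true', '_pred'), 0) == 1 and value == 1 for key, value in gth.items())
--         image_correct = any(image_pred.get(key.replace('_true', '_pred'), 0) == 1 and value == 1 for key, value in gth.items())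
--
--         if text_correct and image_correct:
--             R_ids.append(image_id)
--         elif text_correct:
--             U_text_ids.append(image_id)
--         elif image_correct:
--             U_image_ids.append(image_id)
--         else:
--             AS_ids.append(image_id)
--
--     return R_ids, U_text_ids, U_image_ids, AS_ids
-- ===== SOURCE B (Python) =====
-- def select_subset_ids(text_preds, image_preds, ground_truths):
--     # Stage 1: label each eligible image id with its (text_correct, image_correct) pair,
--     # computed by set intersection: the positive ground-truth keys (renamed to *_pred)
--     # must meet the keys predicted 1.
--     labeled = []
--     for image_id, gth in ground_truths.items():
--         tp = text_preds.get(image_id, {})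
--         ip = image_preds.get(image_id, {})
--         if tp and ip:
--             pos = {k.replace('_true', '_pred') for k, v in gth.items() if v == 1}
--             flags = (not pos.isdisjoint(k for k, v in tp.items() if v == 1),
--                      not pos.isdisjoint(k for k, v in ip.items() if v == 1))
--             labeled.append((image_id, flags))
--     # Stage 2: split the labeled list into the four categories.
--     return tuple([i for i, f in labeled if f == want]
--                  for want in [(True, True), (True, False), (False, True), (False, False)])
-- ===== Notes on version B (the rewrite author's own statement) =====
-- stated objective: alternative
-- what changed: B is two staged passes instead of A's single classify-and-append loop: stage 1 labels each eligible id with a flag pair computed by set disjointness (the set of positive ground-truth keys renamed to *_pred, intersected with the keys predicted 1) instead of A's two any(...) scans with dict lookups; stage 2 splits the labeled list into the four categories by filtering, replacing A's four-way if/elif append chain.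
import Mathlib
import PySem

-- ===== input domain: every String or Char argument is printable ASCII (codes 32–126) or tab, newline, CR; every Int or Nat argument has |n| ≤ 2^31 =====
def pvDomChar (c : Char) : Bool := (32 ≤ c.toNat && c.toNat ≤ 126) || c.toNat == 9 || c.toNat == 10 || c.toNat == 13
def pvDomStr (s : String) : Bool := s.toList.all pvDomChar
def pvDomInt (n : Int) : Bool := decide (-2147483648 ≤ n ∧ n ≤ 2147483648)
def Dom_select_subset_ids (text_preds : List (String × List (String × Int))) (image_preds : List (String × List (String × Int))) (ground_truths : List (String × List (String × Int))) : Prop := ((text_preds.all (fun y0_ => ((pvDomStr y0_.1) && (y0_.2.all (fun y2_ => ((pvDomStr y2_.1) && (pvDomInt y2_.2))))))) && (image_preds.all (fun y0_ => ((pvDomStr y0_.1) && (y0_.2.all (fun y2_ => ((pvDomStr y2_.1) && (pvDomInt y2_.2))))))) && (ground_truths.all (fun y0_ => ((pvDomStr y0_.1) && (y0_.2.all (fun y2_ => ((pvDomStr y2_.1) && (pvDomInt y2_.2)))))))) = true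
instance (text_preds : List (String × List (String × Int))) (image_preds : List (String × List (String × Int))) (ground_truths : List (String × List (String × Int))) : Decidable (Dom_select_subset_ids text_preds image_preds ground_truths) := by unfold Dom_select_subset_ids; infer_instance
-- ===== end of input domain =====

-- B restructures A: instead of A's per-id pair of any(...) lookup scans plus a four-way
-- if/elif append chain, B first labels each eligible id with a flag pair computed by set
-- disjointness (positive ground-truth keys, renamed, vs keys predicted 1), then in a second
-- stage splits the labeled list into the four categories by filtering (objective: alternative).

-- the dict arguments arrive as association lists; both ports rebuild the Python dicts
-- (dict(pairs): a later duplicate key overwrites the value, first position kept) before running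
def pvToDicts (xs : List (String × List (String × Int))) : PySem.Dict String (PySem.Dict String Int) :=
  PySem.Dict.ofList (xs.map (fun p => (p.1, PySem.Dict.ofList p.2)))

-- ===== PORT A =====
def select_subset_ids (text_preds : List (String × List (String × Int))) (image_preds : List (String × List (String × Int))) (ground_truths : List (String × List (String × Int))) : List String × List String × List String × List String :=
  let td := pvToDicts text_preds
  let idp := pvToDicts image_preds
  let gd := pvToDicts ground_truths
  gd.items.foldl (fun (acc : List String × List String × List String × List String) pr =>
    let image_id := pr.1
    let gth := pr.2
    let text_pred := (td.get? image_id).getD PySem.Dict.empty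
    let image_pred := (idp.get? image_id).getD PySem.Dict.empty
    if text_pred.items.isEmpty || image_pred.items.isEmpty then acc
    else
      let tc := gth.items.any (fun kv => (text_pred.getD (PySem.Str.replace kv.1 "_true" "_pred") 0 == 1) && (kv.2 == 1))
      let ic := gth.items.any (fun kv => (image_pred.getD (PySem.Str.replace kv.1 "_true" "_pred") 0 == 1) && (kv.2 == 1))
      if tc && ic then (acc.1 ++ [image_id], acc.2.1, acc.2.2.1, acc.2.2.2)
      else if tc then (acc.1, acc.2.1 ++ [image_id], acc.2.2.1, acc.2.2.2)
      else if ic then (acc.1, acc.2.1, acc.2.2.1 ++ [image_id], acc.2.2.2)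
      else (acc.1, acc.2.1, acc.2.2.1, acc.2.2.2 ++ [image_id]))
    ([], [], [], [])

-- ===== PORT B =====
def select_subset_ids_alt (text_preds : List (String × List (String × Int))) (image_preds : List (String × List (String × Int))) (ground_truths : List (String × List (String × Int))) : List String × List String × List String × List String :=
  let td := pvToDicts text_preds
  let idp := pvToDicts image_preds
  let gd := pvToDicts ground_truths
  -- stage 1: label each eligible id with its (text_correct, image_correct) pair via set disjointness
  let labeled := gd.items.foldl (fun (acc : List (String × (Bool × Bool))) pr =>
    let tp := (td.get? pr.1).getD PySem.Dict.empty
    let ip := (idp.get? pr.1).getD PySem.Dict.empty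
    if tp.items.isEmpty || ip.items.isEmpty then acc
    else
      let pos : PySem.Set String := PySem.Set.ofList ((pr.2.items.filter (fun kv => kv.2 == 1)).map (fun kv => PySem.Str.replace kv.1 "_true" "_pred"))
      let flags := (!(PySem.Set.isdisjoint pos ((tp.items.filter (fun kv => kv.2 == 1)).map (·.1))),
                    !(PySem.Set.isdisjoint pos ((ip.items.filter (fun kv => kv.2 == 1)).map (·.1))))
      acc ++ [(pr.1, flags)]) []
  -- stage 2: split the labeled list into the four categories
  ((labeled.filter (fun p => p.2 == (true, true))).map (·.1),
   (labeled.filter (fun p => p.2 == (true, false))).map (·.1),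
   (labeled.filter (fun p => p.2 == (false, true))).map (·.1),
   (labeled.filter (fun p => p.2 == (false, false))).map (·.1))

-- ===== PRECONDITION & SPEC =====
def Spec_select_subset_ids (text_preds : List (String × List (String × Int))) (image_preds : List (String × List (String × Int))) (ground_truths : List (String × List (String × Int))) (out : List String × List String × List String × List String) : Prop := out = select_subset_ids_alt text_preds image_preds ground_truths
instance (text_preds : List (String × List (String × Int))) (image_preds : List (String × List (String × Int))) (ground_truths : List (String × List (String × Int))) (out : List String × List String × List String × List String) : Decidable (Spec_select_subset_ids text_preds image_preds ground_truths out) := by unfold Spec_select_subset_ids; infer_instance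

-- ===== CLAIM (what is proved, stated in full; the proofs are below) =====
def Claim_equal_select_subset_ids : Prop := ∀ (text_preds : List (String × List (String × Int))) (image_preds : List (String × List (String × Int))) (ground_truths : List (String × List (String × Int))), Dom_select_subset_ids text_preds image_preds ground_truths → Spec_select_subset_ids text_preds image_preds ground_truths (select_subset_ids text_preds image_preds ground_truths)

-- ===== LEMMAS AND PROOFS =====

-- the shared skip test and the two per-id label functions (A's any-scans / B's disjointness)
def pvSkip (td idp : PySem.Dict String (PySem.Dict String Int)) (pr : String × PySem.Dict String Int) : Bool :=
  ((td.get? pr.1).getD PySem.Dict.empty).items.isEmpty || ((idp.get? pr.1).getD PySem.Dict.empty).items.isEmpty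

def pvLabelA (td idp : PySem.Dict String (PySem.Dict String Int)) (pr : String × PySem.Dict String Int) : String × (Bool × Bool) :=
  (pr.1, (pr.2.items.any (fun kv => (((td.get? pr.1).getD PySem.Dict.empty).getD (PySem.Str.replace kv.1 "_true" "_pred") 0 == 1) && (kv.2 == 1)),
          pr.2.items.any (fun kv => (((idp.get? pr.1).getD PySem.Dict.empty).getD (PySem.Str.replace kv.1 "_true" "_pred") 0 == 1) && (kv.2 == 1))))

def pvLabelB (td idp : PySem.Dict String (PySem.Dict String Int)) (pr : String × PySem.Dict String Int) : String × (Bool × Bool) :=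
  (pr.1, (!(PySem.Set.isdisjoint (PySem.Set.ofList ((pr.2.items.filter (fun kv => kv.2 == 1)).map (fun kv => PySem.Str.replace kv.1 "_true" "_pred"))) ((((td.get? pr.1).getD PySem.Dict.empty).items.filter (fun kv => kv.2 == 1)).map (·.1))),
          !(PySem.Set.isdisjoint (PySem.Set.ofList ((pr.2.items.filter (fun kv => kv.2 == 1)).map (fun kv => PySem.Str.replace kv.1 "_true" "_pred"))) ((((idp.get? pr.1).getD PySem.Dict.empty).items.filter (fun kv => kv.2 == 1)).map (·.1)))))

-- A's per-element four-way dispatch, abstracted over the computed label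
def pvStep (acc : List String × List String × List String × List String) (x : String × (Bool × Bool)) : List String × List String × List String × List String :=
  if x.2.1 && x.2.2 then (acc.1 ++ [x.1], acc.2.1, acc.2.2.1, acc.2.2.2)
  else if x.2.1 then (acc.1, acc.2.1 ++ [x.1], acc.2.2.1, acc.2.2.2)
  else if x.2.2 then (acc.1, acc.2.1, acc.2.2.1 ++ [x.1], acc.2.2.2)
  else (acc.1, acc.2.1, acc.2.2.1, acc.2.2.2 ++ [x.1])

-- B's stage-2 four-way split
def pvQuad (m : List (String × (Bool × Bool))) : List String × List String × List String × List String :=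
  ((m.filter (fun p => p.2 == (true, true))).map (·.1),
   (m.filter (fun p => p.2 == (true, false))).map (·.1),
   (m.filter (fun p => p.2 == (false, true))).map (·.1),
   (m.filter (fun p => p.2 == (false, false))).map (·.1))

-- the two ports, read through the abstractions above (definitional)
theorem pv_A_canon (tps ips gts : List (String × List (String × Int))) :
    select_subset_ids tps ips gts =
      (pvToDicts gts).items.foldl (fun acc pr => if pvSkip (pvToDicts tps) (pvToDicts ips) pr then acc else pvStep acc (pvLabelA (pvToDicts tps) (pvToDicts ips) pr)) ([], [], [], []) := rfl

theorem pv_B_canon (tps ips gts : List (String × List (String × Int))) :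
    select_subset_ids_alt tps ips gts =
      pvQuad ((pvToDicts gts).items.foldl (fun acc pr => if pvSkip (pvToDicts tps) (pvToDicts ips) pr then acc else acc ++ [pvLabelB (pvToDicts tps) (pvToDicts ips) pr]) []) := rfl

-- a skip-guarded append loop collects the labels of the non-skipped elements
theorem pv_foldl_skip_append {α β : Type} (l : List α) (q : α → Bool) (f : α → β) (acc : List β) :
    l.foldl (fun acc x => if q x then acc else acc ++ [f x]) acc = acc ++ (l.filter (fun x => !q x)).map f := by
  rw [show (fun (acc : List β) x => if q x then acc else acc ++ [f x]) = fun acc x => if !q x then acc ++ [f x] else acc from by funext a x; cases hq : q x <;> simp]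
  exact PySem.List.foldl_append_if _ _ _ _

-- a skip-guarded fold is a fold over the labels of the non-skipped elements
theorem pv_foldl_skip_fold {α σ : Type} (l : List α) (q : α → Bool) (f : α → String × (Bool × Bool)) (G : σ → String × (Bool × Bool) → σ) (init : σ) :
    l.foldl (fun acc x => if q x then acc else G acc (f x)) init = ((l.filter (fun x => !q x)).map f).foldl G init := by
  rw [show (fun (acc : σ) x => if q x then acc else G acc (f x)) = fun acc x => if !q x then G acc (f x) else acc from by funext a x; cases hq : q x <;> simp]
  rw [PySem.List.foldl_if_eq_foldl_filter, List.foldl_map]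

-- folding the four-way dispatch over a labeled list is filtering it four ways
theorem pv_fold_step (m : List (String × (Bool × Bool))) :
    ∀ acc, m.foldl pvStep acc =
      (acc.1 ++ (m.filter (fun p => p.2 == (true, true))).map (·.1),
       acc.2.1 ++ (m.filter (fun p => p.2 == (true, false))).map (·.1),
       acc.2.2.1 ++ (m.filter (fun p => p.2 == (false, true))).map (·.1),
       acc.2.2.2 ++ (m.filter (fun p => p.2 == (false, false))).map (·.1)) := by
  induction m with
  | nil => intro acc; simp
  | cons x rest ih =>
    intro acc
    obtain ⟨id, t, i⟩ := x
    cases t <;> cases i <;> simp [pvStep, ih]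

-- every value stored in a foldl-of-inserts is an initial value or one of the inserted ones
theorem pv_values_foldl_insert {κ ν : Type} [BEq κ] [LawfulBEq κ] (l : List (κ × ν)) (d : PySem.Dict κ ν) (w : ν)
    (h : w ∈ (l.foldl (fun d p => d.insert p.1 p.2) d).values) :
    w ∈ d.values ∨ ∃ p ∈ l, p.2 = w := by
  induction l generalizing d with
  | nil => exact Or.inl h
  | cons p rest ih =>
    rcases ih (d.insert p.1 p.2) h with h' | h'
    · rcases PySem.Dict.mem_values_insert d p.1 p.2 w h' with h'' | h''
      · exact Or.inr ⟨p, List.mem_cons_self, h''.symm⟩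
      · exact Or.inl h''
    · rcases h' with ⟨q, hq, hw⟩
      exact Or.inr ⟨q, List.mem_cons_of_mem _ hq, hw⟩

-- every dict looked up from pvToDicts (default empty) has Nodup keys
theorem pv_nodup_lookup (xs : List (String × List (String × Int))) (k : String) :
    (((pvToDicts xs).get? k).getD PySem.Dict.empty).keys.Nodup := by
  cases h : (pvToDicts xs).get? k with
  | none => simp [PySem.Dict.empty, PySem.Dict.keys]
  | some tp =>
    simp only [Option.getD_some]
    have hmem : (k, tp) ∈ (pvToDicts xs).items := PySem.Dict.mem_items_of_get?_eq_some _ h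
    have hv : tp ∈ (pvToDicts xs).values := by
      simp only [PySem.Dict.values]
      exact List.mem_map_of_mem hmem
    have hv' : tp ∈ ((xs.map (fun p => (p.1, PySem.Dict.ofList p.2))).foldl (fun d p => d.insert p.1 p.2) PySem.Dict.empty).values := hv
    rcases pv_values_foldl_insert (xs.map (fun p => (p.1, PySem.Dict.ofList p.2))) PySem.Dict.empty tp hv' with h' | h'
    · simp [PySem.Dict.empty, PySem.Dict.values] at h'
    · rcases h' with ⟨q, hq, hw⟩
      rcases List.mem_map.mp hq with ⟨p, _, rfl⟩
      rw [← hw]; exact PySem.Dict.nodup_keys_ofList p.2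

-- membership of a key-with-value-1, through getD, for a Nodup-keyed dict
theorem pv_getD_one_iff (tp : PySem.Dict String Int) (h : tp.keys.Nodup) (k : String) :
    (∃ kv ∈ tp.items, kv.2 = 1 ∧ kv.1 = k) ↔ tp.getD k 0 = 1 := by
  constructor
  · rintro ⟨⟨k', v⟩, hm, hv, rfl⟩
    subst hv
    exact PySem.Dict.getD_of_mem_items tp hm h 0
  · intro hg
    have hsome : tp.get? k = some 1 := by
      rw [PySem.Dict.getD_eq_get?_getD] at hg
      cases hge : tp.get? k with
      | none => rw [hge] at hg; simp at hg
      | some v => rw [hge] at hg; simp at hg; rw [hg]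
    exact ⟨(k, 1), PySem.Dict.mem_items_of_get?_eq_some tp hsome, rfl, rfl⟩

-- B's not-isdisjoint flag equals A's any(...) scan, for a Nodup-keyed prediction dict
theorem pv_flag_eq (tp g : PySem.Dict String Int) (h : tp.keys.Nodup) :
    (!(PySem.Set.isdisjoint
        (PySem.Set.ofList ((g.items.filter (fun kv => kv.2 == 1)).map (fun kv => PySem.Str.replace kv.1 "_true" "_pred")))
        ((tp.items.filter (fun kv => kv.2 == 1)).map (·.1))))
    = g.items.any (fun kv => (tp.getD (PySem.Str.replace kv.1 "_true" "_pred") 0 == 1) && (kv.2 == 1)) := by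
  rw [Bool.eq_iff_iff]
  simp only [List.any_eq_true, Bool.and_eq_true, beq_iff_eq]
  rw [show (!(PySem.Set.isdisjoint
        (PySem.Set.ofList ((g.items.filter (fun kv => kv.2 == 1)).map (fun kv => PySem.Str.replace kv.1 "_true" "_pred")))
        ((tp.items.filter (fun kv => kv.2 == 1)).map (·.1)))) = true ↔
      (∃ gkv ∈ g.items, gkv.2 = 1 ∧ ∃ tkv ∈ tp.items, tkv.2 = 1 ∧ tkv.1 = PySem.Str.replace gkv.1 "_true" "_pred")
    from by simp [PySem.Set.isdisjoint, PySem.Set.mem_ofList]]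
  constructor
  · rintro ⟨gkv, hg, hg1, tkv, ht, ht1, htk⟩
    exact ⟨gkv, hg, (pv_getD_one_iff tp h _).mp ⟨tkv, ht, ht1, htk⟩, hg1⟩
  · rintro ⟨gkv, hg, hget, hg1⟩
    rcases (pv_getD_one_iff tp h _).mpr hget with ⟨tkv, ht, ht1, htk⟩
    exact ⟨gkv, hg, hg1, tkv, ht, ht1, htk⟩

-- the two label functions agree (both prediction dicts come from pvToDicts, so Nodup keys)
theorem pv_label_eq (tps ips : List (String × List (String × Int))) (pr : String × PySem.Dict String Int) :
    pvLabelA (pvToDicts tps) (pvToDicts ips) pr = pvLabelB (pvToDicts tps) (pvToDicts ips) pr := by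
  unfold pvLabelA pvLabelB
  rw [pv_flag_eq _ _ (pv_nodup_lookup tps pr.1), pv_flag_eq _ _ (pv_nodup_lookup ips pr.1)]

-- ===== VERDICT (by name: the statement is the Claim_ definition above) =====
theorem select_subset_ids_spec : Claim_equal_select_subset_ids := by
  intro tps ips gts _
  unfold Spec_select_subset_ids
  rw [pv_A_canon, pv_B_canon, pv_foldl_skip_append,
    pv_foldl_skip_fold _ _ _ pvStep, pv_fold_step,
    List.map_congr_left (fun pr _ => pv_label_eq tps ips pr)]
  simp [pvQuad]
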